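-- pv_equiv track=rewrite | github.com/uvsq22106449/projet_taquin | taquin.py | multi
-- ===== SOURCE A (Python) =====
-- def multi(orig, empty):
--     i, j=orig
--     ii, jj=empty
--     delta=(di, dj)=(ii-i, jj-j)
--     if di!=0!=dj or di==dj==0:
--         return None
--     norm=max(abs(di), abs(dj))
--
--     dirx, diry =(di//norm, dj//norm)
--     L=[((ii-dirx, jj-diry), (ii, jj))]
--
--     for k in range(norm-1):
--         (a, b), destn=L[-1]
--         pos=((a-dirx, b-diry), (a, b))
--         L.append(pos)
--     return L, (dirx, diry)
-- ===== SOURCE B (Python) =====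
-- def multi(orig, empty):
--     i, j = orig
--     ii, jj = empty
--     di, dj = ii - i, jj - j
--     if di != 0 != dj or di == dj == 0:
--         return None
--     dirx = (di > 0) - (di < 0)
--     diry = (dj > 0) - (dj < 0)
--     path = []
--     x, y = i, j
--     while (x, y) != (ii, jj):
--         path.append(((x, y), (x + dirx, y + diry)))
--         x += dirx
--         y += diry
--     path.reverse()
--     return path, (dirx, diry)
-- ===== Notes on version B (the rewrite author's own statement) =====
-- stated objective: alternative
-- what changed: B drops A's norm/floordiv arithmetic and the accumulator that re-reads L[-1]: it computes the unit direction by sign comparisons and walks cell by cell from orig to empty with a while loop, collecting each move and reversing the list at the end.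
import Mathlib
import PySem

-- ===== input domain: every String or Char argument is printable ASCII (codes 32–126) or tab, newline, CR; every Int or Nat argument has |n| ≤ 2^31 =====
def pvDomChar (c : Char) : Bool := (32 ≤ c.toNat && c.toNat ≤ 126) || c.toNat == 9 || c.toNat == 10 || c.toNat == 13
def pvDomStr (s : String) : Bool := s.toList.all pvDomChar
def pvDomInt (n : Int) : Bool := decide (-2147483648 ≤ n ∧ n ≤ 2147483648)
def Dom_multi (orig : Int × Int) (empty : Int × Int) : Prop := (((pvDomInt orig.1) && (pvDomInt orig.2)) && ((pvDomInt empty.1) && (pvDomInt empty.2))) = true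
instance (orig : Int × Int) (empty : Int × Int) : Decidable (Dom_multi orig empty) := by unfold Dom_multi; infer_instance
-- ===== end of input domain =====

-- B replaces A's norm/floordiv arithmetic and last-element-driven accumulation with a
-- sign-step walk from orig towards empty, reversed at the end: an alternative decomposition of the same cost.

-- ===== PORT A =====
-- one loop iteration of A: read L[-1], derive the next pair, append it
def multiStepA (dirx diry : Int) (L : List ((Int × Int) × (Int × Int))) : List ((Int × Int) × (Int × Int)) :=
  let last := PySem.List.pyGetD L (-1) ((0, 0), (0, 0))
  L ++ [((last.1.1 - dirx, last.1.2 - diry), (last.1.1, last.1.2))]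

def multi (orig : Int × Int) (empty : Int × Int) : Option ((List ((Int × Int) × (Int × Int))) × (Int × Int)) :=
  let i := orig.1; let j := orig.2
  let ii := empty.1; let jj := empty.2
  let di := ii - i; let dj := jj - j
  if (di ≠ 0 ∧ dj ≠ 0) ∨ (di = 0 ∧ dj = 0) then none
  else
    let norm : Int := max |di| |dj|
    let dirx := PySem.Int.floordiv di norm
    let diry := PySem.Int.floordiv dj norm
    let L := (PySem.List.pyRange 0 (norm - 1) 1).foldl (fun L _ => multiStepA dirx diry L)
      [((ii - dirx, jj - diry), (ii, jj))]
    some (L, (dirx, diry))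

-- ===== PORT B =====
-- B's while loop: step (x, y) by (dirx, diry) until it reaches (ii, jj), collecting the move
-- made at each visited cell; the fuel argument only makes the loop total (|di| + |dj| steps suffice).
def multiWalk (dirx diry ii jj : Int) : Nat → Int → Int → List ((Int × Int) × (Int × Int))
  | 0, _, _ => []
  | fuel + 1, x, y =>
      if (x, y) = (ii, jj) then []
      else ((x, y), (x + dirx, y + diry)) :: multiWalk dirx diry ii jj fuel (x + dirx) (y + diry)

def multi_alt (orig : Int × Int) (empty : Int × Int) : Option ((List ((Int × Int) × (Int × Int))) × (Int × Int)) :=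
  let i := orig.1; let j := orig.2
  let ii := empty.1; let jj := empty.2
  let di := ii - i; let dj := jj - j
  if (di ≠ 0 ∧ dj ≠ 0) ∨ (di = 0 ∧ dj = 0) then none
  else
    let dirx := (if di > 0 then (1 : Int) else 0) - (if di < 0 then 1 else 0)
    let diry := (if dj > 0 then (1 : Int) else 0) - (if dj < 0 then 1 else 0)
    let path := multiWalk dirx diry ii jj (|di| + |dj|).toNat i j
    some (path.reverse, (dirx, diry))

-- ===== PRECONDITION & SPEC =====
def Spec_multi (orig : Int × Int) (empty : Int × Int) (out : Option ((List ((Int × Int) × (Int × Int))) × (Int × Int))) : Prop := out = multi_alt orig empty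
instance (orig : Int × Int) (empty : Int × Int) (out : Option ((List ((Int × Int) × (Int × Int))) × (Int × Int))) : Decidable (Spec_multi orig empty out) := by unfold Spec_multi; infer_instance

-- ===== CLAIM =====
def Claim_equal_multi : Prop := ∀ (orig : Int × Int) (empty : Int × Int), Dom_multi orig empty → Spec_multi orig empty (multi orig empty)

-- ===== LEMMAS AND PROOFS =====

-- A's loop, started at [f 0], produces the map of f over 0..n when each step takes f m to f (m+1)
theorem loopA_eq (dirx diry : Int) (f : Int → (Int × Int) × (Int × Int))
    (hstep : ∀ m : Int, f (m + 1) = (((f m).1.1 - dirx, (f m).1.2 - diry), ((f m).1.1, (f m).1.2))) :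
    ∀ n : Nat,
      (PySem.List.pyRange 0 (n : Int) 1).foldl (fun L _ => multiStepA dirx diry L) [f 0]
        = (PySem.List.pyRange 0 ((n : Int) + 1) 1).map f := by
  intro n
  induction n with
  | zero =>
      rw [show ((0:Nat):Int) = 0 from rfl, PySem.List.pyRange_one_eq_nil le_rfl,
        show (0 + 1 : Int) = 0 + 1 from rfl, PySem.List.pyRange_one_singleton]
      simp
  | succ n ih =>
      have h1 : PySem.List.pyRange 0 ((n : Int) + 1) 1
          = PySem.List.pyRange 0 (n : Int) 1 ++ [(n : Int)] :=
        PySem.List.pyRange_one_succ_right (by exact_mod_cast Int.natCast_nonneg n)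
      have h2 : PySem.List.pyRange 0 ((n : Int) + 1 + 1) 1
          = PySem.List.pyRange 0 ((n : Int) + 1) 1 ++ [(n : Int) + 1] :=
        PySem.List.pyRange_one_succ_right (by positivity)
      push_cast
      rw [h1, List.foldl_append, ih]
      rw [h2, List.map_append]
      simp only [List.foldl_cons, List.foldl_nil, multiStepA]
      rw [h1, List.map_append, List.map_cons, List.map_nil,
        PySem.List.pyGetD_neg_one_append_singleton]
      simp only [List.map_cons, List.map_nil]
      rw [hstep (n : Int)]

-- B's walk along a straight unit-step line of length n (dirx² + diry² = 1) lists the n moves in order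
theorem walkB_line (dirx diry : Int) (hunit : dirx * dirx + diry * diry = 1) :
    ∀ (n : Nat) (x y : Int),
      multiWalk dirx diry (x + n * dirx) (y + n * diry) n x y
        = (List.range n).map (fun k : Nat =>
            ((x + (k : Int) * dirx, y + (k : Int) * diry),
             (x + ((k : Int) + 1) * dirx, y + ((k : Int) + 1) * diry))) := by
  intro n
  induction n with
  | zero => intro x y; rfl
  | succ n ih =>
      intro x y
      have hne : ¬ ((x, y) = (x + ((n : Int) + 1) * dirx, y + ((n : Int) + 1) * diry)) := by
        intro h
        obtain ⟨hx, hy⟩ := Prod.mk.injEq .. ▸ h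
        have hn1 : (0 : Int) < (n : Int) + 1 := by positivity
        have hdx : dirx = 0 := by
          rcases mul_eq_zero.mp (by omega : ((n : Int) + 1) * dirx = 0) with h' | h'
          · omega
          · exact h'
        have hdy : diry = 0 := by
          rcases mul_eq_zero.mp (by omega : ((n : Int) + 1) * diry = 0) with h' | h'
          · omega
          · exact h'
        rw [hdx, hdy] at hunit; omega
      have hx' : x + ((n : Nat) + 1 : Nat) * dirx = (x + dirx) + (n : Int) * dirx := by
        push_cast; ring
      have hy' : y + ((n : Nat) + 1 : Nat) * diry = (y + diry) + (n : Int) * diry := by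
        push_cast; ring
      rw [multiWalk, hx', hy']
      rw [if_neg (fun h => hne (h.trans (Prod.ext (by push_cast; ring) (by push_cast; ring))))]
      rw [ih (x + dirx) (y + diry)]
      rw [List.range_succ_eq_map, List.map_cons, List.map_map]
      refine congrArg₂ _ (by push_cast; ring_nf) ?_
      refine List.map_congr_left fun k _ => ?_
      simp only [Function.comp_apply, Nat.succ_eq_add_one]
      refine Prod.ext (Prod.ext ?_ ?_) (Prod.ext ?_ ?_) <;> (push_cast; ring)

-- reversing B's walk gives exactly A's list
theorem rev_walk_eq_mapA (dirx diry ii jj : Int) (N : Nat) (hN : 0 < N) :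
    ((List.range N).map (fun k : Nat =>
        ((ii - (N : Int) * dirx + (k : Int) * dirx, jj - (N : Int) * diry + (k : Int) * diry),
         (ii - (N : Int) * dirx + ((k : Int) + 1) * dirx,
          jj - (N : Int) * diry + ((k : Int) + 1) * diry)))).reverse
      = (PySem.List.pyRange 0 (N : Int) 1).map (fun m : Int =>
          ((ii - (m + 1) * dirx, jj - (m + 1) * diry), (ii - m * dirx, jj - m * diry))) := by
  rw [PySem.List.pyRange_one, List.map_map]
  rw [← List.map_reverse, List.range_eq_range', List.reverse_range', List.map_map]
  have hlen : ((N : Int) - 0).toNat = N := by omega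
  rw [hlen]
  refine List.map_congr_left fun k hk => ?_
  have hk' : k < N := List.mem_range.mp hk
  simp only [Function.comp_apply]
  have hc : ((0 + N - 1 - k : Nat) : Int) = (N : Int) - 1 - k := by omega
  refine Prod.ext (Prod.ext ?_ ?_) (Prod.ext ?_ ?_)
  all_goals (rw [hc]; push_cast; ring)

-- ===== VERDICT =====
theorem multi_spec : Claim_equal_multi := by
  unfold Claim_equal_multi
  intro orig empty _
  unfold Spec_multi multi multi_alt
  by_cases h : (empty.1 - orig.1 ≠ 0 ∧ empty.2 - orig.2 ≠ 0) ∨ (empty.1 - orig.1 = 0 ∧ empty.2 - orig.2 = 0)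
  · simp [h]
  · simp only [h, if_false]
    set di := empty.1 - orig.1 with hdi
    set dj := empty.2 - orig.2 with hdj
    -- exactly one of di, dj is nonzero
    have hone : (di ≠ 0 ∧ dj = 0) ∨ (di = 0 ∧ dj ≠ 0) := by tauto
    set norm : Int := max |di| |dj| with hnorm
    -- the two direction computations agree, the step is a unit step, and di = norm·dirx, dj = norm·diry
    have key : PySem.Int.floordiv di norm
          = (if di > 0 then (1 : Int) else 0) - (if di < 0 then 1 else 0)
        ∧ PySem.Int.floordiv dj norm
          = (if dj > 0 then (1 : Int) else 0) - (if dj < 0 then 1 else 0) := by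
      have hmax : norm = |di| + |dj| := by
        rcases hone with ⟨h1, h2⟩ | ⟨h1, h2⟩ <;> simp [hnorm, h1, h2, abs_nonneg]
      constructor
      · rcases lt_trichotomy di 0 with hlt | heq | hgt
        · have : norm = -di + |dj| := by rw [hmax, abs_of_neg hlt]
          rcases hone with ⟨_, h2⟩ | ⟨h1, _⟩
          · have hnd : norm = -di := by simp [this, h2]
            have hv : PySem.Int.floordiv di (-di) = -1 := by
              have h9 := Int.mul_fdiv_cancel (-1) (b := -di) (by omega)
              simp only [neg_mul, one_mul, neg_neg] at h9
              simpa [PySem.Int.floordiv] using h9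
            rw [hnd, hv, if_neg (by omega), if_pos hlt]
            norm_num
          · omega
        · have hv : PySem.Int.floordiv 0 norm = 0 := by
            simp [PySem.Int.floordiv, Int.zero_fdiv]
          rw [heq, hv, if_neg (by omega)]
          norm_num
        · have : norm = di + |dj| := by rw [hmax, abs_of_pos hgt]
          rcases hone with ⟨_, h2⟩ | ⟨h1, _⟩
          · have hnd : norm = di := by simp [this, h2]
            have hv : PySem.Int.floordiv di di = 1 := by
              have h9 := Int.mul_fdiv_cancel 1 (b := di) (by omega)
              simp only [one_mul] at h9
              simpa [PySem.Int.floordiv] using h9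
            rw [hnd, hv, if_pos hgt, if_neg (by omega)]
            norm_num
          · omega
      · rcases lt_trichotomy dj 0 with hlt | heq | hgt
        · have : norm = |di| + -dj := by rw [hmax, abs_of_neg hlt]
          rcases hone with ⟨_, h2⟩ | ⟨h1, _⟩
          · omega
          · have hnd : norm = -dj := by simp [this, h1]
            have hv : PySem.Int.floordiv dj (-dj) = -1 := by
              have h9 := Int.mul_fdiv_cancel (-1) (b := -dj) (by omega)
              simp only [neg_mul, one_mul, neg_neg] at h9
              simpa [PySem.Int.floordiv] using h9
            rw [hnd, hv, if_neg (by omega), if_pos hlt]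
            norm_num
        · have hv : PySem.Int.floordiv 0 norm = 0 := by
            simp [PySem.Int.floordiv, Int.zero_fdiv]
          rw [heq, hv, if_neg (by omega)]
          norm_num
        · have : norm = |di| + dj := by rw [hmax, abs_of_pos hgt]
          rcases hone with ⟨_, h2⟩ | ⟨h1, _⟩
          · omega
          · have hnd : norm = dj := by simp [this, h1]
            have hv : PySem.Int.floordiv dj dj = 1 := by
              have h9 := Int.mul_fdiv_cancel 1 (b := dj) (by omega)
              simp only [one_mul] at h9
              simpa [PySem.Int.floordiv] using h9
            rw [hnd, hv, if_pos hgt, if_neg (by omega)]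
            norm_num
    obtain ⟨hkx, hky⟩ := key
    rw [hkx, hky]
    set dirx := (if di > 0 then (1 : Int) else 0) - (if di < 0 then 1 else 0) with hdirx
    set diry := (if dj > 0 then (1 : Int) else 0) - (if dj < 0 then 1 else 0) with hdiry
    have habs : norm = |di| + |dj| := by
      rcases hone with ⟨h1, h2⟩ | ⟨h1, h2⟩ <;> simp [hnorm, h1, h2, abs_nonneg]
    have hunit : dirx * dirx + diry * diry = 1 := by
      rw [hdirx, hdiry]
      rcases hone with ⟨h1, h2⟩ | ⟨h1, h2⟩ <;> split_ifs <;> omega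
    have hdieq : di = norm * dirx ∧ dj = norm * diry := by
      rw [habs, hdirx, hdiry]
      rcases abs_cases di with ⟨e1, _⟩ | ⟨e1, _⟩ <;> rcases abs_cases dj with ⟨e2, _⟩ | ⟨e2, _⟩ <;>
        rw [e1, e2] <;> rcases hone with ⟨h1, h2⟩ | ⟨h1, h2⟩ <;> split_ifs <;> constructor <;> omega
    have hpos : 1 ≤ norm := by
      rcases hone with ⟨h1, _⟩ | ⟨_, h1⟩
      · have := lt_of_lt_of_le (abs_pos.mpr h1) (le_max_left |di| |dj|); omega
      · have := lt_of_lt_of_le (abs_pos.mpr h1) (le_max_right |di| |dj|); omega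
    obtain ⟨N, hNn⟩ : ∃ N : Nat, norm = (N : Int) := ⟨norm.toNat, by omega⟩
    have hNpos : 0 < N := by omega
    have hfuel : (|di| + |dj|).toNat = N := by
      have : |di| + |dj| = norm := by
        rcases hone with ⟨h1, h2⟩ | ⟨h1, h2⟩ <;> simp [hnorm, h1, h2, abs_nonneg]
      omega
    -- B's walk: start point written as (ii - N·dirx) + …
    have hstart : orig.1 = empty.1 - (N : Int) * dirx ∧ orig.2 = empty.2 - (N : Int) * diry := by
      constructor
      · have := hdieq.1; rw [hNn] at this; omega
      · have := hdieq.2; rw [hNn] at this; omega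
    have hB := walkB_line dirx diry hunit N (empty.1 - (N : Int) * dirx) (empty.2 - (N : Int) * diry)
    have hBargs : empty.1 - (N : Int) * dirx + (N : Int) * dirx = empty.1 ∧
        empty.2 - (N : Int) * diry + (N : Int) * diry = empty.2 := ⟨by ring, by ring⟩
    rw [hBargs.1, hBargs.2] at hB
    rw [hfuel, hstart.1, hstart.2, hB]
    -- A's loop via loopA_eq
    set f : Int → (Int × Int) × (Int × Int) := fun m =>
      ((empty.1 - (m + 1) * dirx, empty.2 - (m + 1) * diry),
       (empty.1 - m * dirx, empty.2 - m * diry)) with hf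
    have hstep : ∀ m : Int, f (m + 1) = (((f m).1.1 - dirx, (f m).1.2 - diry), ((f m).1.1, (f m).1.2)) := by
      intro m
      simp only [hf]
      refine Prod.ext (Prod.ext ?_ ?_) (Prod.ext ?_ ?_) <;> ring
    have hf0 : [((empty.1 - dirx, empty.2 - diry), (empty.1, empty.2))] = [f 0] := by
      simp [hf]
    obtain ⟨n, hn⟩ : ∃ n : Nat, N = n + 1 := ⟨N - 1, by omega⟩
    have hA := loopA_eq dirx diry f hstep n
    have hnm1 : norm - 1 = (n : Int) := by rw [hNn, hn]; push_cast; ring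
    rw [hnm1, hf0, hA]
    have hrev := rev_walk_eq_mapA dirx diry empty.1 empty.2 N hNpos
    rw [hrev]
    have : ((N : Int)) = (n : Int) + 1 := by rw [hn]; push_cast; ring
    rw [this]
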